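-- pv_equiv track=rewrite | github.com/mashu3/drawio2pptx | drawio2pptx/stencil/aws_icons.py | _get_style_value
-- ===== SOURCE A (Python) =====
-- from typing import Optional, Dict, List, Set, cast
--
-- def _get_style_value(style_str: Optional[str], key: str) -> Optional[str]:
--     """Extract a single style value from draw.io style string."""
--     if not style_str:
--         return None
--     for part in style_str.split(";"):
--         if "=" in part:
--             k, v = part.split("=", 1)
--             if k.strip() == key:
--                 value = v.strip()
--                 return value or None
--     return None
-- ===== SOURCE B (Python) =====
-- def _get_style_value(style_str, key):
--     """Extract a single style value from draw.io style string."""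
--     if not style_str:
--         return None
--     table = {}
--     for part in style_str.split(";"):
--         if "=" in part:
--             k, v = part.split("=", 1)
--             table.setdefault(k.strip(), v.strip())
--     return table.get(key) or None
-- ===== Notes on version B (the rewrite author's own statement) =====
-- stated objective: alternative
-- what changed: B parses the whole style string once into a first-occurrence-wins table (dict.setdefault) and answers by a single lookup, instead of A's early-returning linear scan with the comparison inline.
import Mathlib
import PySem

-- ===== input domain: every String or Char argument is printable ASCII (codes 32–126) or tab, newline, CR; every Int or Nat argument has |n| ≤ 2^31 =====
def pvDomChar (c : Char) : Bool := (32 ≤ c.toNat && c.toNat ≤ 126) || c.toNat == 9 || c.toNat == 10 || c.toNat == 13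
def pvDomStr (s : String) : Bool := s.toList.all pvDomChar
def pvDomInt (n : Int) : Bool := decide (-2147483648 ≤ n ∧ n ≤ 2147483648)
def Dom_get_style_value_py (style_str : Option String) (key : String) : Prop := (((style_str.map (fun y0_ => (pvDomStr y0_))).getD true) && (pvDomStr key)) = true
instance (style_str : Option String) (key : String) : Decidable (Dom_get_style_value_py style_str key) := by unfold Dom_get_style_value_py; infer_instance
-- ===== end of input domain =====

-- ===== PORT A =====
-- B parses the whole style string once into a first-occurrence table and does one lookup; alternative decomposition, same cost.
-- A's loop: first ';'-part containing '=' whose stripped key equals `key`; empty stripped value becomes none.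
def aLoop (parts : List String) (key : String) : Option String :=
  match parts with
  | [] => none
  | part :: rest =>
    if PySem.Str.isIn "=" part then
      let kv := (PySem.Str.splitMax? part "=" 1).getD []
      let k := kv.getD 0 ""
      let v := kv.getD 1 ""
      if PySem.Str.strip k = key then
        let value := PySem.Str.strip v
        if value = "" then none else some value
      else aLoop rest key
    else aLoop rest key

def get_style_value_py (style_str : Option String) (key : String) : Option String :=
  match style_str with
  | none => none
  | some s => if s = "" then none else aLoop ((PySem.Str.split? s ";").getD []) key

-- ===== PORT B =====
def bBuild (parts : List String) : PySem.Dict String String :=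
  parts.foldl (fun d part =>
    if PySem.Str.isIn "=" part then
      let kv := (PySem.Str.splitMax? part "=" 1).getD []
      d.setdefault (PySem.Str.strip (kv.getD 0 "")) (PySem.Str.strip (kv.getD 1 ""))
    else d) PySem.Dict.empty

def get_style_value_py_alt (style_str : Option String) (key : String) : Option String :=
  match style_str with
  | none => none
  | some s =>
    if s = "" then none
    else
      match (bBuild ((PySem.Str.split? s ";").getD [])).get? key with
      | none => none
      | some v => if v = "" then none else some v

-- ===== PRECONDITION & SPEC =====
def Spec_get_style_value_py (style_str : Option String) (key : String) (out : Option String) : Prop := out = get_style_value_py_alt style_str key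
instance (style_str : Option String) (key : String) (out : Option String) : Decidable (Spec_get_style_value_py style_str key out) := by unfold Spec_get_style_value_py; infer_instance

-- ===== CLAIM (what is proved, stated in full; the proofs are below) =====
def Claim_equal_get_style_value_py : Prop := ∀ (style_str : Option String) (key : String), Dom_get_style_value_py style_str key → Spec_get_style_value_py style_str key (get_style_value_py style_str key)

-- ===== LEMMAS AND PROOFS =====

-- proof helper: the raw (unconverted) first matching stripped value of A's scan
def rawScan (parts : List String) (key : String) : Option String :=
  match parts with
  | [] => none
  | part :: rest =>
    if PySem.Str.isIn "=" part then
      let kv := (PySem.Str.splitMax? part "=" 1).getD []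
      if PySem.Str.strip (kv.getD 0 "") = key then some (PySem.Str.strip (kv.getD 1 ""))
      else rawScan rest key
    else rawScan rest key

theorem aLoop_eq_rawScan (parts : List String) (key : String) :
    aLoop parts key = match rawScan parts key with
      | none => none
      | some v => if v = "" then none else some v := by
  induction parts with
  | nil => rfl
  | cons part rest ih =>
    simp only [aLoop, rawScan]
    split_ifs <;> simp_all [List.getD]

theorem bBuild_get?_eq (parts : List String) (key : String) (d : PySem.Dict String String) :
    (parts.foldl (fun d part =>
      if PySem.Str.isIn "=" part then
        let kv := (PySem.Str.splitMax? part "=" 1).getD []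
        d.setdefault (PySem.Str.strip (kv.getD 0 "")) (PySem.Str.strip (kv.getD 1 ""))
      else d) d).get? key = (d.get? key).or (rawScan parts key) := by
  induction parts generalizing d with
  | nil => simp [rawScan]
  | cons part rest ih =>
    rw [List.foldl_cons]
    simp only [rawScan]
    by_cases hin : PySem.Str.isIn "=" part = true
    · rw [if_pos hin, if_pos hin]
      set k := PySem.Str.strip (((PySem.Str.splitMax? part "=" 1).getD []).getD 0 "")
      set v := PySem.Str.strip (((PySem.Str.splitMax? part "=" 1).getD []).getD 1 "")
      by_cases hk : k = key
      · subst hk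
        rw [ih, PySem.Dict.get?_setdefault_self]
        cases h : d.get? k <;> simp
      · rw [ih, PySem.Dict.get?_setdefault_of_ne _ _ (fun h => hk h.symm)]
        simp [hk]
    · rw [if_neg hin, if_neg hin, ih]

-- ===== VERDICT (by name: the statement is the Claim_ definition above) =====
theorem get_style_value_py_spec : Claim_equal_get_style_value_py := by
  intro style_str key _
  unfold Spec_get_style_value_py get_style_value_py get_style_value_py_alt
  cases style_str with
  | none => rfl
  | some s =>
    by_cases hs : s = ""
    · simp [hs]
    · simp only [hs, if_false]
      rw [aLoop_eq_rawScan]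
      unfold bBuild
      rw [bBuild_get?_eq]
      rfl
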